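-- pv_equiv track=rewrite | github.com/nattigy/competitive_programming | bootcamp 2021 fall/contest-9/C. Update Files.py | updateFiles
-- ===== SOURCE A (Python) =====
-- def updateFiles(c, k):
--     updated = 1
--     time = 0
--     while updated < c:
--         if updated <= k:
--             updated += updated
--         elif updated > k:
--             un_updated = c - updated
--             if un_updated % k == 0:
--                 return time + un_updated // k
--             else:
--                 return time + (un_updated // k) + 1
--         time += 1
--     return time
-- ===== SOURCE B (Python) =====
-- def updateFiles(c, k):
--     # Closed form: number of doublings T from bit_length of min(k, c-1), then
--     # ceiling division for the remaining files.
--     if c <= 1: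
--         return 0
--     m = min(k, c - 1)
--     T = m.bit_length() if m > 0 else 0
--     updated = 1 << T
--     if updated >= c:
--         return T
--     un = c - updated
--     return T + un // k + (0 if un % k == 0 else 1)
-- ===== Notes on version B (the rewrite author's own statement) =====
-- stated objective: alternative
-- what changed: Replaced A's doubling loop by a closed form: T = bit_length(min(k, c-1)) doublings, then one ceiling division for the remainder.
import Mathlib
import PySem

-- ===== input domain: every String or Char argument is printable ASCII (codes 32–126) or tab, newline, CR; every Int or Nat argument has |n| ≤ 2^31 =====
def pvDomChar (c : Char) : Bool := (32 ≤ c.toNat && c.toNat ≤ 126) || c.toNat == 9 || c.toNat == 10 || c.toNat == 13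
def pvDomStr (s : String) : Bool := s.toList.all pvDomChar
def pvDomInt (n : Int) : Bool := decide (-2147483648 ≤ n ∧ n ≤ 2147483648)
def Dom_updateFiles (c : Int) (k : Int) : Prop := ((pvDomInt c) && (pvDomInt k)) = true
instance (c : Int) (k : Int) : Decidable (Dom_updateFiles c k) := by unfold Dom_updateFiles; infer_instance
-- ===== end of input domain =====

-- B replaces A's doubling loop by a closed form (bit_length + one ceiling division); equivalence proved on all inputs where A does not raise.

-- ===== PORT A =====
-- while loop of A; `h : 1 ≤ updated` records the invariant (updated starts at 1 and only doubles) used for termination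
def updateFilesLoop (c k updated time : Int) (h : 1 ≤ updated) : Int :=
  if _hlt : updated < c then
    if updated ≤ k then
      updateFilesLoop c k (updated + updated) (time + 1) (by omega)
    else
      -- `elif updated > k` is exactly the negation of `updated <= k`
      let un_updated := c - updated
      if PySem.Int.mod un_updated k = 0 then
        time + PySem.Int.floordiv un_updated k
      else
        time + PySem.Int.floordiv un_updated k + 1
  else time
termination_by (c - updated).toNat
decreasing_by omega

def updateFiles (c : Int) (k : Int) : Int := updateFilesLoop c k 1 0 (by norm_num)

-- ===== PORT B =====
def updateFiles_alt (c : Int) (k : Int) : Int :=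
  if c ≤ 1 then 0
  else
    let m := min k (c - 1)
    let T : Nat := if 0 < m then PySem.Int.bitLength m else 0
    let updated : Int := 2 ^ T
    if updated ≥ c then (T : Int)
    else
      let un := c - updated
      (T : Int) + PySem.Int.floordiv un k + (if PySem.Int.mod un k = 0 then 0 else 1)

-- ===== PRECONDITION & SPEC =====
-- Pre_ excludes exactly the inputs where Python A raises ZeroDivisionError (c > 1 and k = 0).
def Pre_updateFiles (c : Int) (k : Int) : Prop := ¬ (1 < c ∧ k = 0)
instance (c : Int) (k : Int) : Decidable (Pre_updateFiles c k) := by unfold Pre_updateFiles; infer_instance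
def pvWitness_updateFiles : Int × Int := (10, 3)

def Spec_updateFiles (c : Int) (k : Int) (out : Int) : Prop := out = updateFiles_alt c k
instance (c : Int) (k : Int) (out : Int) : Decidable (Spec_updateFiles c k out) := by unfold Spec_updateFiles; infer_instance

-- ===== CLAIM (what is proved, stated in full; the proofs are below) =====
def Claim_equal_updateFiles : Prop := ∀ (c : Int) (k : Int), Dom_updateFiles c k → Pre_updateFiles c k → Spec_updateFiles c k (updateFiles c k)

-- ===== LEMMAS AND PROOFS =====

-- T used by B, as a Nat
def altT (c k : Int) : Nat :=
  if 0 < min k (c - 1) then PySem.Int.bitLength (min k (c - 1)) else 0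

lemma two_pow_le_of_lt_altT (c k : Int) (i : Nat) (hi : i < altT c k) :
    (2 : Int) ^ i ≤ min k (c - 1) := by
  unfold altT at hi
  split at hi
  · rename_i hm
    set m := min k (c - 1) with hm'
    have h1 : 2 ^ (PySem.Int.bitLength m - 1) ≤ m.natAbs :=
      PySem.Int.two_pow_bitLength_le m (by omega)
    have h2 : (2 : Nat) ^ i ≤ 2 ^ (PySem.Int.bitLength m - 1) :=
      Nat.pow_le_pow_right (by norm_num) (by omega)
    have h3 : m.natAbs = m.toNat := by omega
    have : (2 : Nat) ^ i ≤ m.toNat := by omega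
    have := (Int.toNat_of_nonneg (le_of_lt hm)) ▸ (Int.ofNat_le.mpr this)
    push_cast at this ⊢
    omega
  · omega

lemma min_lt_two_pow_altT (c k : Int) : min k (c - 1) < (2 : Int) ^ (altT c k) := by
  unfold altT
  split
  · rename_i hm
    set m := min k (c - 1)
    have h1 : m.natAbs < 2 ^ (PySem.Int.bitLength m) := PySem.Int.lt_two_pow_bitLength m
    have h3 : m.natAbs = m.toNat := by omega
    have : m.toNat < (2 : Nat) ^ (PySem.Int.bitLength m) := by omega
    have := Int.ofNat_lt.mpr this
    rw [Int.toNat_of_nonneg (le_of_lt hm)] at this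
    push_cast at this ⊢
    exact this
  · simpa using by omega

-- B's value, written via altT (definitional reshuffle of updateFiles_alt)
lemma alt_eq (c k : Int) :
    updateFiles_alt c k =
      if c ≤ 1 then 0
      else if (2 : Int) ^ (altT c k) ≥ c then ((altT c k : Nat) : Int)
      else ((altT c k : Nat) : Int) + PySem.Int.floordiv (c - 2 ^ (altT c k)) k +
            (if PySem.Int.mod (c - 2 ^ (altT c k)) k = 0 then 0 else 1) := by
  unfold updateFiles_alt altT
  rfl

-- main loop characterisation: starting at updated = 2^t, time = t with t ≤ altT
lemma loop_eq (c k : Int) (hc : 1 < c) :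
    ∀ (t : Nat), t ≤ altT c k →
      updateFilesLoop c k (2 ^ t) t (one_le_pow₀ one_le_two) = updateFiles_alt c k := by
  intro t ht
  induction' hn : altT c k - t with n ih generalizing t
  · -- t = altT
    have htT : t = altT c k := by omega
    subst htT
    have hgt := min_lt_two_pow_altT c k
    rw [updateFilesLoop, alt_eq c k]
    by_cases hcc : (2 : Int) ^ (altT c k) < c
    · have hk : ¬ ((2:Int) ^ (altT c k) ≤ k) := by
        omega
      simp [hcc, hk, if_neg (by omega : ¬ c ≤ 1), if_neg (by omega : ¬ (2:Int) ^ (altT c k) ≥ c)]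
      split_ifs <;> ring
    · simp [hcc, if_neg (by omega : ¬ c ≤ 1), if_pos (by omega : (2:Int) ^ (altT c k) ≥ c)]
  · -- t < altT : one doubling step
    have hlt : t < altT c k := by omega
    have hle := two_pow_le_of_lt_altT c k t hlt
    simp only [le_min_iff] at hle
    rw [updateFilesLoop]
    have h1 : (2:Int) ^ t < c := by omega
    have h2 : (2:Int) ^ t ≤ k := hle.1
    rw [dif_pos h1, if_pos h2]
    have := ih (t + 1) (by omega) (by omega)
    push_cast at this
    simp only [show (2:Int) ^ (t + 1) = 2 ^ t + 2 ^ t from by ring] at this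
    exact this

-- ===== VERDICT (by name: the statement is the Claim_ definition above) =====
theorem updateFiles_spec : Claim_equal_updateFiles := by
  intro c k _ _
  unfold Spec_updateFiles updateFiles
  by_cases hc : 1 < c
  · have := loop_eq c k hc 0 (Nat.zero_le _)
    simpa using this
  · -- c ≤ 1: loop exits immediately with time = 0; B returns 0
    rw [updateFilesLoop]
    simp [updateFiles_alt, if_neg (by omega : ¬ (1:Int) < c), if_pos (by omega : c ≤ 1)]
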